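-- pv_equiv track=rewrite | github.com/jpmutschler/Calypso | scripts/ptrace_capture_correlation.py | _build_filter_hex
-- ===== SOURCE A (Python) =====
-- def _build_filter_hex(match_byte: int, dw_position: int) -> tuple[str, str]:
--     """Build 128-char match/mask hex strings for a PTrace 512-bit filter.
--
--     Targets a single byte at the lowest byte position [7:0] of the specified
--     DWORD in the 16-DWORD filter block.
--
--     Args:
--         match_byte: The byte value to match (e.g., 0x04 for CfgRd0 flit type).
--         dw_position: Which DWORD (0-15) contains the target byte.
--
--     Returns:
--         (match_hex, mask_hex) — each is a 128-character hex string.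
--
--     Encoding:
--         - Each DWORD is written as 8 little-endian hex chars.
--         - Mask polarity: bit=1 → don't care, bit=0 → must match.
--         - match: all zeros except dw_position = match_byte & 0xFF at byte 0.
--         - mask: all 0xFFFFFFFF except dw_position = 0xFFFFFF00.
--     """
--     match_dwords = [0x00000000] * 16
--     mask_dwords = [0xFFFFFFFF] * 16
--
--     match_dwords[dw_position] = match_byte & 0xFF
--     mask_dwords[dw_position] = 0xFFFFFF00
--
--     def _dwords_to_hex(dwords: list[int]) -> str:
--         parts = []
--         for dw in dwords:
--             # Little-endian: least significant byte first
--             b = dw.to_bytes(4, byteorder="little")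
--             parts.append(b.hex())
--         return "".join(parts)
--
--     return _dwords_to_hex(match_dwords), _dwords_to_hex(mask_dwords)
-- ===== SOURCE B (Python) =====
-- def _build_filter_hex(match_byte: int, dw_position: int) -> tuple[str, str]:
--     match_parts = ["00000000"] * 16
--     mask_parts = ["ffffffff"] * 16
--     match_parts[dw_position] = f"{match_byte & 0xFF:02x}000000"
--     mask_parts[dw_position] = "00ffffff"
--     return "".join(match_parts), "".join(mask_parts)
-- ===== Notes on version B (the rewrite author's own statement) =====
-- stated objective: simpler
-- what changed: B assembles the two 128-char strings directly from constant 8-char hex pieces, replacing A's integer dword arrays, to_bytes little-endian conversion and per-dword hex loop with a single list of string parts and one join.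
import Mathlib
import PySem

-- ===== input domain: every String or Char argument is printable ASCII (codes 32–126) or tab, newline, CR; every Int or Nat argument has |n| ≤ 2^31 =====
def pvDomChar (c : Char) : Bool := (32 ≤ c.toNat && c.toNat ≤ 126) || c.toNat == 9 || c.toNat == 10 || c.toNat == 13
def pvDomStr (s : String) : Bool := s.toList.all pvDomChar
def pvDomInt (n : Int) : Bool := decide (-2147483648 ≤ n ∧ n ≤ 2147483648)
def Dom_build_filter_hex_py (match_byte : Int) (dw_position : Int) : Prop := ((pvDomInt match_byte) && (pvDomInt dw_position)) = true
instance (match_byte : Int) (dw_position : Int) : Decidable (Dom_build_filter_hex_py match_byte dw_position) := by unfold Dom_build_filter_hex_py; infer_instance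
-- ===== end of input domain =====

-- B builds the two 128-char strings from constant 8-char string pieces (one join), instead of
-- A's integer dword arrays + to_bytes little-endian conversion + per-dword hex loop (objective: simpler).

-- ===== PORT A =====
-- lowercase hex digit / two-digit hex of a byte: exact port of bytes.hex() per byte
def pvHexDigitA (n : Nat) : Char := if n < 10 then Char.ofNat (48 + n) else Char.ofNat (87 + n)
def pvByteHexA (n : Nat) : String := String.ofList [pvHexDigitA (n / 16 % 16), pvHexDigitA (n % 16)]
-- dw.to_bytes(4, byteorder="little").hex(): exact for 0 ≤ dw < 2^32 (the only values A produces)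
def pvDwordHexLE (dw : Int) : String :=
  pvByteHexA (dw.toNat % 256) ++ pvByteHexA (dw.toNat / 256 % 256) ++
  pvByteHexA (dw.toNat / 65536 % 256) ++ pvByteHexA (dw.toNat / 16777216 % 256)
-- _dwords_to_hex: parts = []; for dw in dwords: parts.append(b.hex()); return "".join(parts)
def pvDwordsToHex (dwords : List Int) : String :=
  String.join (dwords.foldl (fun parts dw => parts ++ [pvDwordHexLE dw]) [])
-- match_byte & 0xFF is ported as emod 256 (equal in Python for every int);
-- list index assignment via pySetD (out-of-range dw_position = IndexError, excluded by Pre_)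
def build_filter_hex_py (match_byte : Int) (dw_position : Int) : String × String :=
  let match_dwords : List Int := List.replicate 16 0x00000000
  let mask_dwords : List Int := List.replicate 16 0xFFFFFFFF
  let match_dwords := PySem.List.pySetD match_dwords dw_position (match_byte.emod 256)
  let mask_dwords := PySem.List.pySetD mask_dwords dw_position 0xFFFFFF00
  (pvDwordsToHex match_dwords, pvDwordsToHex mask_dwords)

-- ===== PORT B =====
-- f"{v:02x}" : exact for 0 ≤ v < 256 (the only values B formats, after & 0xFF)
def pvHexDigitB (n : Nat) : Char := if n < 10 then Char.ofNat (48 + n) else Char.ofNat (87 + n)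
def pvFmt02x (v : Nat) : String := String.ofList [pvHexDigitB (v / 16 % 16), pvHexDigitB (v % 16)]
def build_filter_hex_py_alt (match_byte : Int) (dw_position : Int) : String × String :=
  let match_parts : List String := List.replicate 16 "00000000"
  let mask_parts : List String := List.replicate 16 "ffffffff"
  let match_parts := PySem.List.pySetD match_parts dw_position (pvFmt02x (match_byte.emod 256).toNat ++ "000000")
  let mask_parts := PySem.List.pySetD mask_parts dw_position "00ffffff"
  (String.join match_parts, String.join mask_parts)

-- ===== PRECONDITION & SPEC =====
-- Pre_ excludes exactly the dw_position values on which A's list index assignment raises IndexError.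
def Pre_build_filter_hex_py (match_byte : Int) (dw_position : Int) : Prop :=
  -16 ≤ dw_position ∧ dw_position < 16
instance (match_byte : Int) (dw_position : Int) : Decidable (Pre_build_filter_hex_py match_byte dw_position) := by unfold Pre_build_filter_hex_py; infer_instance
def pvWitness_build_filter_hex_py : Int × Int := (4, 3)

def Spec_build_filter_hex_py (match_byte : Int) (dw_position : Int) (out : String × String) : Prop := out = build_filter_hex_py_alt match_byte dw_position
instance (match_byte : Int) (dw_position : Int) (out : String × String) : Decidable (Spec_build_filter_hex_py match_byte dw_position out) := by unfold Spec_build_filter_hex_py; infer_instance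

-- ===== CLAIM (what is proved, stated in full; the proofs are below) =====
def Claim_equal_build_filter_hex_py : Prop := ∀ (match_byte : Int) (dw_position : Int), Dom_build_filter_hex_py match_byte dw_position → Pre_build_filter_hex_py match_byte dw_position → Spec_build_filter_hex_py match_byte dw_position (build_filter_hex_py match_byte dw_position)

-- ===== LEMMAS AND PROOFS =====

theorem pv_map_pySetD {α β : Type} (f : α → β) (xs : List α) (i : Int) (v : α) :
    (PySem.List.pySetD xs i v).map f = PySem.List.pySetD (xs.map f) i (f v) := by
  unfold PySem.List.pySetD PySem.List.pySet?
  rw [List.length_map]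
  cases PySem.List.pyIdx? xs.length i <;> simp [List.map_set]

theorem pv_foldl_append_singleton (dwords : List Int) (acc : List String) :
    dwords.foldl (fun parts dw => parts ++ [pvDwordHexLE dw]) acc = acc ++ dwords.map pvDwordHexLE := by
  induction dwords generalizing acc with
  | nil => simp
  | cons x xs ih => simp [List.foldl, ih]

theorem pv_dwordsToHex_eq_join_map (dwords : List Int) :
    pvDwordsToHex dwords = String.join (dwords.map pvDwordHexLE) := by
  unfold pvDwordsToHex
  congr 1
  exact pv_foldl_append_singleton dwords []

theorem pv_hex_emod (m : Int) :
    pvDwordHexLE (m.emod 256) = pvFmt02x (m.emod 256).toNat ++ "000000" := by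
  have h0 : (0:Int) ≤ m.emod 256 := Int.emod_nonneg m (by norm_num)
  have h1 : m.emod 256 < 256 := Int.emod_lt_of_pos m (by norm_num)
  have hv : (m.emod 256).toNat < 256 := by omega
  unfold pvDwordHexLE
  set v := (m.emod 256).toNat with hvdef
  have e1 : v % 256 = v := Nat.mod_eq_of_lt hv
  have e2 : v / 256 = 0 := Nat.div_eq_of_lt hv
  have e3 : v / 65536 = 0 := Nat.div_eq_of_lt (by omega)
  have e4 : v / 16777216 = 0 := Nat.div_eq_of_lt (by omega)
  rw [e1, e2, e3, e4]
  have hb : pvByteHexA v = pvFmt02x v := rfl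
  rw [hb, String.append_assoc, String.append_assoc]
  congr 1

theorem build_filter_hex_py_spec_aux (match_byte : Int) (dw_position : Int) :
    build_filter_hex_py match_byte dw_position = build_filter_hex_py_alt match_byte dw_position := by
  simp only [build_filter_hex_py, build_filter_hex_py_alt]
  rw [pv_dwordsToHex_eq_join_map, pv_dwordsToHex_eq_join_map, pv_map_pySetD, pv_map_pySetD]
  rw [List.map_replicate, List.map_replicate, pv_hex_emod]
  have h1 : pvDwordHexLE 0x00000000 = "00000000" := by decide
  have h2 : pvDwordHexLE 0xFFFFFFFF = "ffffffff" := by decide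
  have h3 : pvDwordHexLE 0xFFFFFF00 = "00ffffff" := by decide
  rw [h1, h2, h3]

-- ===== VERDICT (by name: the statement is the Claim_ definition above) =====
theorem build_filter_hex_py_spec : Claim_equal_build_filter_hex_py := by
  intro m d _ _
  exact build_filter_hex_py_spec_aux m d
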